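-- pv_equiv track=rewrite | github.com/my-lambda-projects/Lambda | 2-resources/__DATA-Structures/_LEETCODE/Leetcode-py/lintcode519.py | consistentHashing
-- ===== SOURCE A (Python) =====
-- def consistentHashing(n):
--     results = [[0, 359, 1]]
--     for i in range(1, n):
--         index = 0
--         for j in range(i):
--             if (
--                 results[j][1] - results[j][0] + 1
--                 > results[index][1] - results[index][0] + 1
--             ):
--                 index = j
--
--         x, y = results[index][0], results[index][1]
--         results[index][1] = (x + y) // 2
--         results.append([(x + y) // 2 + 1, y, i + 1])
--
--     return results
-- ===== SOURCE B (Python) =====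
-- def _insort(pq, item):
--     # binary search for the leftmost position whose element is >= item,
--     # then insert there; pq is kept sorted ascending.
--     lo, hi = 0, len(pq)
--     while lo < hi:
--         m = (lo + hi) // 2
--         if pq[m] < item:
--             lo = m + 1
--         else:
--             hi = m
--     pq.insert(lo, item)
--
--
-- def consistentHashing(n):
--     results = [[0, 359, 1]]
--     # priority queue of (-interval_size, position), kept sorted ascending:
--     # its head is always the largest interval, smallest position first.
--     pq = [(-360, 0)]
--     for i in range(1, n):
--         _, index = pq.pop(0)
--         x, y = results[index][0], results[index][1]
--         mid = (x + y) // 2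
--         results[index][1] = mid
--         results.append([mid + 1, y, i + 1])
--         _insort(pq, (-(mid - x + 1), index))
--         _insort(pq, (-(y - mid), i))
--     return results
-- ===== Notes on version B (the rewrite author's own statement) =====
-- stated objective: faster
-- what changed: B replaces A's per-step linear rescan for the largest interval with a sorted priority queue of (-size, index) pairs maintained by binary-search insertion, popping its head each step.
import Mathlib
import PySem

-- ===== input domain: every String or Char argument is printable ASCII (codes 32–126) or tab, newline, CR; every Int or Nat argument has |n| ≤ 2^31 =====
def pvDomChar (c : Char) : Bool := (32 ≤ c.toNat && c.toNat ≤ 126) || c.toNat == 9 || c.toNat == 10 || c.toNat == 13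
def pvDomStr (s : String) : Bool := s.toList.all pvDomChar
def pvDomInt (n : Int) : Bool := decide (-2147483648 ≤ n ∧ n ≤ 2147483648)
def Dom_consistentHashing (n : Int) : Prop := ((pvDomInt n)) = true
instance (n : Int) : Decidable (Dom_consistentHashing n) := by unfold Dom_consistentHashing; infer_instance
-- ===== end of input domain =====

-- B replaces A's per-step linear rescan for the largest interval with a sorted
-- priority queue of (-size, index) pairs maintained by binary-search insertion
-- (faster by a large constant factor; equal return value proved below).

-- ===== PORT A =====
-- row access: all indices in A are nonnegative and in range, so getD is exact
def pvRow (rs : List (List Int)) (j : Int) : List Int := rs.getD j.toNat []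

def pvSize (rs : List (List Int)) (j : Int) : Int :=
  (pvRow rs j).getD 1 0 - (pvRow rs j).getD 0 0 + 1

-- the inner 'for j in range(i)' scan computing the first index of the largest interval
def pvArgmax (rs : List (List Int)) (i : Int) : Int :=
  (PySem.List.pyRange 0 i 1).foldl
    (fun index j => if pvSize rs j > pvSize rs index then j else index) 0

def pvStepA (rs : List (List Int)) (i : Int) : List (List Int) :=
  let index := pvArgmax rs i
  let x := (pvRow rs index).getD 0 0
  let y := (pvRow rs index).getD 1 0
  let rs' := rs.set index.toNat ((pvRow rs index).set 1 (PySem.Int.floordiv (x + y) 2))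
  rs' ++ [[PySem.Int.floordiv (x + y) 2 + 1, y, i + 1]]

def consistentHashing (n : Int) : List (List Int) :=
  (PySem.List.pyRange 1 n 1).foldl pvStepA [[0, 359, 1]]

-- ===== PORT B =====
-- Python tuple comparison '<' on pairs of ints
def pvLt (a b : Int × Int) : Bool := a.1 < b.1 || (a.1 == b.1 && a.2 < b.2)

-- the 'while lo < hi' binary-search loop of _insort (lo, hi are nonnegative);
-- fuel only makes the loop total: hi - lo shrinks every iteration, so
-- fuel = pq.length is never exhausted
def pvFindPos (pq : List (Int × Int)) (item : Int × Int) : Nat → Nat → Nat → Nat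
  | 0, lo, _ => lo
  | fuel + 1, lo, hi =>
    if lo < hi then
      let m := (lo + hi) / 2
      if pvLt (pq.getD m (0, 0)) item then pvFindPos pq item fuel (m + 1) hi
      else pvFindPos pq item fuel lo m
    else lo

def pvInsort (pq : List (Int × Int)) (item : Int × Int) : List (Int × Int) :=
  PySem.List.insert pq ((pvFindPos pq item pq.length 0 pq.length : Nat) : Int) item

def pvStepB (st : List (List Int) × List (Int × Int)) (i : Int) :
    List (List Int) × List (Int × Int) :=
  match st.2 with
  | [] => st   -- unreachable: pq is never empty (Python's pop(0) would raise there)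
  | (_, index) :: rest =>
    let rs := st.1
    let x := (pvRow rs index).getD 0 0
    let y := (pvRow rs index).getD 1 0
    let mid := PySem.Int.floordiv (x + y) 2
    let rs2 := (rs.set index.toNat ((pvRow rs index).set 1 mid)) ++ [[mid + 1, y, i + 1]]
    (rs2, pvInsort (pvInsort rest (-(mid - x + 1), index)) (-(y - mid), i))

def consistentHashing_alt (n : Int) : List (List Int) :=
  ((PySem.List.pyRange 1 n 1).foldl pvStepB ([[0, 359, 1]], [(-360, 0)])).1

-- ===== PRECONDITION & SPEC =====
def Spec_consistentHashing (n : Int) (out : List (List Int)) : Prop := out = consistentHashing_alt n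
instance (n : Int) (out : List (List Int)) : Decidable (Spec_consistentHashing n out) := by unfold Spec_consistentHashing; infer_instance

-- ===== CLAIM (what is proved, stated in full; the proofs are below) =====
def Claim_equal_consistentHashing : Prop := ∀ (n : Int), Dom_consistentHashing n → Spec_consistentHashing n (consistentHashing n)

-- ===== LEMMAS AND PROOFS =====

-- non-strict pair order: a ≤ b iff ¬ b < a
def pvLe (a b : Int × Int) : Prop := pvLt b a = false

theorem pvLe_iff (a b : Int × Int) :
    pvLe a b ↔ (a.1 < b.1 ∨ (a.1 = b.1 ∧ a.2 ≤ b.2)) := by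
  obtain ⟨a1, a2⟩ := a; obtain ⟨b1, b2⟩ := b
  simp [pvLe, pvLt]; omega

theorem pvLt_iff (a b : Int × Int) :
    pvLt a b = true ↔ (a.1 < b.1 ∨ (a.1 = b.1 ∧ a.2 < b.2)) := by
  obtain ⟨a1, a2⟩ := a; obtain ⟨b1, b2⟩ := b
  simp [pvLt]

theorem pvLe_refl (a : Int × Int) : pvLe a a := by
  rw [pvLe_iff]; omega

theorem pvLe_trans {a b c : Int × Int} (h1 : pvLe a b) (h2 : pvLe b c) : pvLe a c := by
  rw [pvLe_iff] at *; omega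

theorem pvLe_antisymm {a b : Int × Int} (h1 : pvLe a b) (h2 : pvLe b a) : a = b := by
  obtain ⟨a1, a2⟩ := a; obtain ⟨b1, b2⟩ := b
  rw [pvLe_iff] at *; simp only [Prod.mk.injEq]
  simp only at h1 h2; constructor <;> omega

theorem pvLt_of_le_of_lt {a b c : Int × Int} (h1 : pvLe a b) (h2 : pvLt b c = true) :
    pvLt a c = true := by
  rw [pvLe_iff] at h1; rw [pvLt_iff] at *; omega

theorem pvLe_of_lt {a b : Int × Int} (h : pvLt a b = true) : pvLe a b := by
  rw [pvLt_iff] at h; rw [pvLe_iff]; omega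

-- the multiset of (-size, position) keys of the current interval list
def pvKeys (rs : List (List Int)) : List (Int × Int) :=
  (List.range rs.length).map (fun (p : Nat) => (-(pvSize rs (p : Int)), ((p : Int))))

-- invariant tying B's priority queue to the interval list
def pvInv (rs : List (List Int)) (pq : List (Int × Int)) : Prop :=
  pq.Pairwise pvLe ∧ pq.Perm (pvKeys rs) ∧ (∀ r ∈ rs, ∃ a b c, r = [a, b, c])

theorem pvPairwise_getD {pq : List (Int × Int)} (hs : pq.Pairwise pvLe)
    {j1 j2 : Nat} (h12 : j1 < j2) (h2 : j2 < pq.length) :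
    pvLe (pq.getD j1 (0,0)) (pq.getD j2 (0,0)) := by
  rw [List.getD_eq_getElem pq (0,0) (by omega), List.getD_eq_getElem pq (0,0) h2]
  exact List.pairwise_iff_getElem.mp hs j1 j2 (by omega) h2 h12

theorem pvFindPos_spec (pq : List (Int × Int)) (item : Int × Int)
    (hs : pq.Pairwise pvLe) :
    ∀ (fuel lo hi : Nat), hi - lo ≤ fuel → lo ≤ hi → hi ≤ pq.length →
    (∀ j, j < lo → pvLt (pq.getD j (0,0)) item = true) →
    (∀ j, hi ≤ j → j < pq.length → pvLt (pq.getD j (0,0)) item = false) →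
    pvFindPos pq item fuel lo hi ≤ pq.length ∧
    (∀ j, j < pvFindPos pq item fuel lo hi → pvLt (pq.getD j (0,0)) item = true) ∧
    (∀ j, pvFindPos pq item fuel lo hi ≤ j → j < pq.length → pvLt (pq.getD j (0,0)) item = false) := by
  intro fuel
  induction fuel with
  | zero =>
    intro lo hi hd hlohi hhi hlow hhigh
    have : lo = hi := by omega
    rw [pvFindPos]
    exact ⟨by omega, fun j hj => hlow j hj, fun j hj1 hj2 => hhigh j (by omega) hj2⟩
  | succ fuel ih =>
    intro lo hi hd hlohi hhi hlow hhigh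
    by_cases hlt : lo < hi
    · rw [pvFindPos]; simp only [hlt, if_pos]
      set m := (lo + hi) / 2 with hm
      have hmlo : lo ≤ m := by omega
      have hmhi : m < hi := by omega
      by_cases hc : pvLt (pq.getD m (0,0)) item = true
      · rw [if_pos hc]
        exact ih (m+1) hi (by omega) (by omega) hhi
          (fun j hj => by
            rcases Nat.lt_or_ge j m with h | h
            · exact pvLt_of_le_of_lt (pvPairwise_getD hs h (by omega)) hc
            · have : j = m := by omega
              rw [this]; exact hc)
          hhigh
      · rw [if_neg hc]
        have hcf : pvLt (pq.getD m (0,0)) item = false := by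
          cases h : pvLt (pq.getD m (0,0)) item
          · rfl
          · exact absurd h hc
        exact ih lo m (by omega) (by omega) (by omega) hlow
          (fun j hj1 hj2 => by
            rcases Nat.lt_or_ge j hi with h | h
            · rcases Nat.eq_or_lt_of_le hj1 with he | hlt2
              · rw [← he]; exact hcf
              · cases hjv : pvLt (pq.getD j (0,0)) item
                · rfl
                · exact absurd (pvLt_of_le_of_lt (pvPairwise_getD hs hlt2 hj2) hjv)
                    (by rw [hcf]; simp)
            · exact hhigh j h hj2)
    · rw [pvFindPos]
      have : lo = hi := by omega
      simp only [if_neg hlt]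
      exact ⟨by omega, fun j hj => hlow j hj, fun j hj1 hj2 => hhigh j (by omega) hj2⟩

theorem pvInsort_spec (pq : List (Int × Int)) (item : Int × Int)
    (hs : pq.Pairwise pvLe) :
    (pvInsort pq item).Pairwise pvLe ∧ (pvInsort pq item).Perm (item :: pq) := by
  obtain ⟨hk1, hk2, hk3⟩ := pvFindPos_spec pq item hs pq.length 0 pq.length (by omega)
    (Nat.zero_le _) (le_refl _) (fun j hj => absurd hj (Nat.not_lt_zero j))
    (fun j hj1 hj2 => absurd hj1 (by omega))
  set k := pvFindPos pq item pq.length 0 pq.length with hkdef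
  have hins : pvInsort pq item = pq.take k ++ item :: pq.drop k := by
    unfold pvInsort
    rw [← hkdef, PySem.List.insert_natCast pq k item hk1]
  rw [hins]
  constructor
  · rw [List.pairwise_append]
    refine ⟨hs.sublist (List.take_sublist _ _), ?_, ?_⟩
    · rw [List.pairwise_cons]
      refine ⟨?_, hs.sublist (List.drop_sublist _ _)⟩
      intro b hb
      obtain ⟨j, hj, hbj⟩ := List.mem_iff_getElem.mp hb
      have hlen : k + j < pq.length := by
        have := List.length_drop (l := pq) (i := k); omega
      have : b = pq.getD (k + j) (0,0) := by
        rw [List.getD_eq_getElem pq (0,0) hlen, ← hbj, List.getElem_drop]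
      rw [this]
      exact hk3 (k + j) (by omega) hlen
    · intro a ha b hb
      obtain ⟨j, hj, haj⟩ := List.mem_iff_getElem.mp ha
      have hjk : j < k := by
        have := List.length_take_le k pq; simp at hj; omega
      have hja : a = pq.getD j (0,0) := by
        rw [List.getD_eq_getElem pq (0,0) (by omega), ← haj, List.getElem_take]
      have hail : pvLe a item := by rw [hja]; exact pvLe_of_lt (hk2 j hjk)
      rcases List.mem_cons.mp hb with hb | hb
      · rw [hb]; exact hail
      · obtain ⟨j2, hj2, hbj2⟩ := List.mem_iff_getElem.mp hb
        have hlen2 : k + j2 < pq.length := by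
          have := List.length_drop (l := pq) (i := k); omega
        have hjb : b = pq.getD (k + j2) (0,0) := by
          rw [List.getD_eq_getElem pq (0,0) hlen2, ← hbj2, List.getElem_drop]
        refine pvLe_trans hail ?_
        rw [hjb]
        exact hk3 (k + j2) (by omega) hlen2
  · have h := List.perm_middle (a := item) (l₁ := pq.take k) (l₂ := pq.drop k)
    rw [List.take_append_drop] at h
    exact h

theorem pvArgmax_aux (rs : List (List Int)) :
    ∀ m : Nat, 1 ≤ m →
    ∃ p : Nat, p < m ∧
      (List.range m).foldl
        (fun (index : Int) (j : Nat) => if pvSize rs (j : Int) > pvSize rs index then ((j : Int)) else index) 0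
        = (p : Int) ∧
      ∀ q : Nat, q < m →
        pvLe (-(pvSize rs (p : Int)), (p : Int)) (-(pvSize rs (q : Int)), (q : Int)) := by
  intro m hm
  induction m, hm using Nat.le_induction with
  | base =>
    refine ⟨0, by omega, ?_, ?_⟩
    · simp [List.range_succ]
    · intro q hq
      have : q = 0 := by omega
      subst this; exact pvLe_refl _
  | succ m hm ih =>
    obtain ⟨p, hp, hfold, hmin⟩ := ih
    rw [List.range_succ, List.foldl_append, hfold]
    simp only [List.foldl_cons, List.foldl_nil]
    by_cases h : pvSize rs (m : Int) > pvSize rs (p : Int)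
    · refine ⟨m, by omega, by rw [if_pos h], ?_⟩
      intro q hq
      rcases Nat.lt_or_ge q m with hq2 | hq2
      · refine pvLe_trans (pvLe_of_lt ?_) (hmin q hq2)
        rw [pvLt_iff]; left; simp only; omega
      · have : q = m := by omega
        subst this; exact pvLe_refl _
    · refine ⟨p, by omega, by rw [if_neg h], ?_⟩
      intro q hq
      rcases Nat.lt_or_ge q m with hq2 | hq2
      · exact hmin q hq2
      · have : q = m := by omega
        subst this
        rw [pvLe_iff]; simp only
        have hc : (p : Int) < (q : Int) := by exact_mod_cast hp
        omega

theorem pvArgmax_spec (rs : List (List Int)) (i : Int)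
    (hlen : (rs.length : Int) = i) (hpos : 1 ≤ i) :
    ∃ p : Nat, p < rs.length ∧ pvArgmax rs i = (p : Int) ∧
      ∀ k ∈ pvKeys rs, pvLe (-(pvSize rs (p : Int)), (p : Int)) k := by
  have hn : 1 ≤ rs.length := by omega
  obtain ⟨p, hp, hfold, hmin⟩ := pvArgmax_aux rs rs.length hn
  refine ⟨p, hp, ?_, ?_⟩
  · unfold pvArgmax
    rw [PySem.List.pyRange_one, List.foldl_map]
    have : (i - 0).toNat = rs.length := by omega
    rw [this]
    simp only [zero_add]
    exact hfold
  · intro k hk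
    unfold pvKeys at hk
    obtain ⟨q, hq, rfl⟩ := List.mem_map.mp hk
    exact hmin q (List.mem_range.mp hq)

theorem pvKeys_length (rs : List (List Int)) : (pvKeys rs).length = rs.length := by
  simp [pvKeys]

theorem pvKeys_getElem (rs : List (List Int)) (q : Nat) (hq : q < (pvKeys rs).length) :
    (pvKeys rs)[q] = (-(pvSize rs (q : Int)), ((q : Int))) := by
  simp [pvKeys]

theorem pvStep_eq (rs : List (List Int)) (pq : List (Int × Int)) (i : Int)
    (hinv : pvInv rs pq) (hlen : (rs.length : Int) = i) (hpos : 1 ≤ i) :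
    pvStepA rs i = (pvStepB (rs, pq) i).1 ∧
    pvInv (pvStepB (rs, pq) i).1 (pvStepB (rs, pq) i).2 ∧
    ((pvStepB (rs, pq) i).1.length : Int) = i + 1 := by
  subst hlen
  obtain ⟨hsort, hperm, hshape⟩ := hinv
  obtain ⟨p, hp, hfold, hmin⟩ := pvArgmax_spec rs (rs.length : Int) rfl hpos
  have hpqlen : pq.length = rs.length := by rw [hperm.length_eq, pvKeys_length]
  have hlen1 : 1 ≤ rs.length := by omega
  cases pq with
  | nil => simp at hpqlen; omega
  | cons hd rest =>
  obtain ⟨h1, h2⟩ := hd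
  -- the head of the queue is the key of A's argmax position
  have hkeyp_mem : (-(pvSize rs (p : Int)), ((p : Int))) ∈ pvKeys rs := by
    unfold pvKeys
    exact List.mem_map.mpr ⟨p, List.mem_range.mpr hp, rfl⟩
  have hh_mem : (h1, h2) ∈ pvKeys rs := hperm.mem_iff.mp List.mem_cons_self
  have hh_min : ∀ k ∈ pvKeys rs, pvLe (h1, h2) k := by
    intro k hk
    rcases List.mem_cons.mp (hperm.mem_iff.mpr hk) with hk2 | hk2
    · rw [hk2]; exact pvLe_refl _
    · exact (List.pairwise_cons.mp hsort).1 k hk2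
  have hhkey : (h1, h2) = (-(pvSize rs (p : Int)), ((p : Int))) :=
    pvLe_antisymm (hh_min _ hkeyp_mem) (hmin _ hh_mem)
  have hh2 : h2 = (p : Int) := by
    rw [Prod.mk.injEq] at hhkey; exact hhkey.2
  subst hh2
  -- names for the values both programs compute
  have htn : ((p : Int)).toNat = p := Int.toNat_natCast p
  have hrow_mem : rs.getD p [] ∈ rs := by
    rw [List.getD_eq_getElem rs [] hp]; exact List.getElem_mem hp
  obtain ⟨x0, y0, z0, hrow0⟩ := hshape _ hrow_mem
  have hrowEq : pvRow rs ((p : Int)) = [x0, y0, z0] := by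
    unfold pvRow; rw [htn]; exact hrow0
  have hx : (pvRow rs ((p : Int))).getD 0 0 = x0 := by rw [hrowEq]; rfl
  have hy : (pvRow rs ((p : Int))).getD 1 0 = y0 := by rw [hrowEq]; rfl
  have hset : (pvRow rs ((p : Int))).set 1 (PySem.Int.floordiv
      ((pvRow rs ((p : Int))).getD 0 0 + (pvRow rs ((p : Int))).getD 1 0) 2) =
      [x0, PySem.Int.floordiv (x0 + y0) 2, z0] := by
    rw [hrowEq]
    rfl
  -- explicit form of B's step (rfl: match and lets reduce)
  have hB : pvStepB (rs, (h1, (p : Int)) :: rest) (rs.length : Int) =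
      (rs.set ((p : Int)).toNat ((pvRow rs ((p : Int))).set 1 (PySem.Int.floordiv ((pvRow rs ((p : Int))).getD 0 0 + (pvRow rs ((p : Int))).getD 1 0) 2)) ++
        [[PySem.Int.floordiv ((pvRow rs ((p : Int))).getD 0 0 + (pvRow rs ((p : Int))).getD 1 0) 2 + 1, (pvRow rs ((p : Int))).getD 1 0, (rs.length : Int) + 1]],
       pvInsort (pvInsort rest (-(PySem.Int.floordiv ((pvRow rs ((p : Int))).getD 0 0 + (pvRow rs ((p : Int))).getD 1 0) 2 - (pvRow rs ((p : Int))).getD 0 0 + 1), ((p : Int))))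
         (-((pvRow rs ((p : Int))).getD 1 0 - PySem.Int.floordiv ((pvRow rs ((p : Int))).getD 0 0 + (pvRow rs ((p : Int))).getD 1 0) 2), (rs.length : Int))) := rfl
  rw [htn, hset, hx, hy] at hB
  have hA : pvStepA rs (rs.length : Int) =
      rs.set (pvArgmax rs (rs.length : Int)).toNat
        ((pvRow rs (pvArgmax rs (rs.length : Int))).set 1
          (PySem.Int.floordiv ((pvRow rs (pvArgmax rs (rs.length : Int))).getD 0 0 +
            (pvRow rs (pvArgmax rs (rs.length : Int))).getD 1 0) 2)) ++
        [[PySem.Int.floordiv ((pvRow rs (pvArgmax rs (rs.length : Int))).getD 0 0 +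
            (pvRow rs (pvArgmax rs (rs.length : Int))).getD 1 0) 2 + 1,
          (pvRow rs (pvArgmax rs (rs.length : Int))).getD 1 0, (rs.length : Int) + 1]] := rfl
  rw [hfold, htn, hset, hx, hy] at hA
  rw [hB]
  set E : List (List Int) :=
    rs.set p [x0, PySem.Int.floordiv (x0 + y0) 2, z0] ++ [[PySem.Int.floordiv (x0 + y0) 2 + 1, y0, (rs.length : Int) + 1]] with hE
  have hElen : E.length = rs.length + 1 := by
    rw [hE]; simp
  -- row lookups in the new list
  have hgetE : ∀ q : Nat, q < rs.length →
      E.getD q [] = if p = q then [x0, PySem.Int.floordiv (x0 + y0) 2, z0] else rs.getD q [] := by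
    intro q hq
    rw [hE]
    rw [List.getD_eq_getElem _ [] (by simp; omega)]
    rw [List.getElem_append_left (by simpa using hq)]
    rw [List.getElem_set]
    by_cases hqp : p = q
    · simp [hqp]
    · simp only [if_neg hqp]
      rw [List.getD_eq_getElem rs [] hq]
  have hgetElast : E.getD rs.length [] = [PySem.Int.floordiv (x0 + y0) 2 + 1, y0, (rs.length : Int) + 1] := by
    rw [hE]
    rw [List.getD_eq_getElem _ [] (by simp)]
    rw [List.getElem_append_right (by simp)]
    simp
  -- sizes in the new list
  have hsizeEp : pvSize E ((p : Int)) = PySem.Int.floordiv (x0 + y0) 2 - x0 + 1 := by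
    unfold pvSize pvRow
    rw [htn, hgetE p hp]
    simp
  have hsizeEq : ∀ q : Nat, q < rs.length → p ≠ q → pvSize E ((q : Int)) = pvSize rs ((q : Int)) := by
    intro q hq hqp
    unfold pvSize pvRow
    rw [Int.toNat_natCast, hgetE q hq, if_neg hqp]
  have hsizeElast : pvSize E ((rs.length : Nat) : Int) = y0 - PySem.Int.floordiv (x0 + y0) 2 := by
    unfold pvSize pvRow
    rw [Int.toNat_natCast, hgetElast]
    simp; ring
  -- the keys of the new list
  have hkeysE : pvKeys E =
      (pvKeys rs).set p (-(PySem.Int.floordiv (x0 + y0) 2 - x0 + 1), ((p : Int))) ++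
        [(-(y0 - PySem.Int.floordiv (x0 + y0) 2), (rs.length : Int))] := by
    apply List.ext_getElem
    · rw [pvKeys_length, hElen]; simp [pvKeys_length]
    · intro q hq1 hq2
      rw [pvKeys_getElem E q hq1]
      have hq' : q < rs.length + 1 := by rw [pvKeys_length, hElen] at hq1; exact hq1
      by_cases hql : q < rs.length
      · rw [List.getElem_append_left (by rw [List.length_set, pvKeys_length]; exact hql)]
        rw [List.getElem_set]
        by_cases hqp : p = q
        · subst hqp
          rw [if_pos rfl, Prod.mk.injEq]
          exact ⟨by rw [hsizeEp], rfl⟩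
        · rw [if_neg hqp, pvKeys_getElem rs q (by rw [pvKeys_length]; exact hql)]
          rw [hsizeEq q hql hqp]
      · have hqe : q = rs.length := by omega
        subst hqe
        rw [List.getElem_append_right (by rw [List.length_set, pvKeys_length])]
        simp only [List.length_set, pvKeys_length, Nat.sub_self, List.getElem_singleton]
        rw [Prod.mk.injEq]
        exact ⟨by rw [hsizeElast], rfl⟩
  -- queue bookkeeping
  obtain ⟨hs1, hp1⟩ := pvInsort_spec rest (-(PySem.Int.floordiv (x0 + y0) 2 - x0 + 1), ((p : Int)))
    ((List.pairwise_cons.mp hsort).2)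
  obtain ⟨hs2, hp2⟩ := pvInsort_spec (pvInsort rest (-(PySem.Int.floordiv (x0 + y0) 2 - x0 + 1), ((p : Int))))
    (-(y0 - PySem.Int.floordiv (x0 + y0) 2), (rs.length : Int)) hs1
  have hkp : (pvKeys rs)[p]'(by rw [pvKeys_length]; exact hp) = (-(pvSize rs ((p : Int))), ((p : Int))) :=
    pvKeys_getElem rs p (by rw [pvKeys_length]; exact hp)
  have hpermA : ((pvKeys rs).set p (-(PySem.Int.floordiv (x0 + y0) 2 - x0 + 1), ((p : Int)))).Perm
      ((-(PySem.Int.floordiv (x0 + y0) 2 - x0 + 1), ((p : Int))) :: (pvKeys rs).eraseIdx p) :=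
    List.set_perm_cons_eraseIdx (by rw [pvKeys_length]; exact hp) _
  have hpermB : ((-(pvSize rs ((p : Int))), ((p : Int))) :: (pvKeys rs).eraseIdx p).Perm (pvKeys rs) := by
    rw [← hkp]
    exact List.getElem_cons_eraseIdx_perm (by rw [pvKeys_length]; exact hp)
  have hrest : rest.Perm ((pvKeys rs).eraseIdx p) := by
    have h3 : ((h1, (p : Int)) :: rest).Perm ((-(pvSize rs ((p : Int))), ((p : Int))) :: (pvKeys rs).eraseIdx p) :=
      hperm.trans hpermB.symm
    rw [hhkey] at h3
    exact h3.cons_inv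
  have hpermFinal : (pvInsort (pvInsort rest (-(PySem.Int.floordiv (x0 + y0) 2 - x0 + 1), ((p : Int))))
      (-(y0 - PySem.Int.floordiv (x0 + y0) 2), (rs.length : Int))).Perm (pvKeys E) := by
    refine hp2.trans ?_
    refine ((hp1.cons _).trans ?_)
    refine (((hrest.cons _).cons _).trans ?_)
    refine (((hpermA.symm).cons _).trans ?_)
    rw [hkeysE]
    exact (List.perm_append_singleton _ _).symm
  refine ⟨by rw [hA], ⟨hs2, hpermFinal, ?_⟩, ?_⟩
  · -- shape of every row
    intro r hr
    rcases List.mem_append.mp hr with hr | hr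
    · rcases List.mem_or_eq_of_mem_set hr with hr2 | hr2
      · exact hshape r hr2
      · exact ⟨x0, PySem.Int.floordiv (x0 + y0) 2, z0, hr2⟩
    · rcases List.mem_singleton.mp hr with rfl
      exact ⟨PySem.Int.floordiv (x0 + y0) 2 + 1, y0, (rs.length : Int) + 1, rfl⟩
  · rw [hElen]; push_cast; ring

theorem pvMain (m : Nat) :
    (((PySem.List.pyRange 1 (1 + m) 1).foldl pvStepA [[0, 359, 1]]) =
      ((PySem.List.pyRange 1 (1 + m) 1).foldl pvStepB ([[0, 359, 1]], [(-360, 0)])).1) ∧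
    pvInv ((PySem.List.pyRange 1 (1 + m) 1).foldl pvStepB ([[0, 359, 1]], [(-360, 0)])).1
          ((PySem.List.pyRange 1 (1 + m) 1).foldl pvStepB ([[0, 359, 1]], [(-360, 0)])).2 ∧
    ((((PySem.List.pyRange 1 (1 + m) 1).foldl pvStepB ([[0, 359, 1]], [(-360, 0)])).1.length : Int) = 1 + m) := by
  induction m with
  | zero =>
    rw [show ((1 : Int) + ((0 : Nat) : Int)) = 1 by norm_num]
    rw [PySem.List.pyRange_one_eq_nil (le_refl 1)]
    refine ⟨rfl, ⟨?_, ?_, ?_⟩, by simp⟩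
    · exact List.pairwise_singleton _ _
    · have h : pvKeys [[0, 359, 1]] = [((-360 : Int), (0 : Int))] := by decide
      rw [List.foldl_nil]
      exact h ▸ List.Perm.refl _
    · intro r hr
      rw [List.foldl_nil] at hr
      rcases List.mem_singleton.mp hr with rfl
      exact ⟨0, 359, 1, rfl⟩
  | succ m ih =>
    obtain ⟨ih1, ih2, ih3⟩ := ih
    have hsplit : PySem.List.pyRange 1 (1 + ((m + 1 : Nat) : Int)) 1 =
        PySem.List.pyRange 1 (1 + (m : Int)) 1 ++ [1 + (m : Int)] := by
      rw [show (1 + ((m + 1 : Nat) : Int)) = (1 + (m : Int)) + 1 by push_cast; ring]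
      exact PySem.List.pyRange_one_succ_right (by omega)
    rw [hsplit, List.foldl_append, List.foldl_append]
    simp only [List.foldl_cons, List.foldl_nil]
    obtain ⟨e1, e2, e3⟩ := pvStep_eq
      ((PySem.List.pyRange 1 (1 + (m : Int)) 1).foldl pvStepB ([[0, 359, 1]], [(-360, 0)])).1
      ((PySem.List.pyRange 1 (1 + (m : Int)) 1).foldl pvStepB ([[0, 359, 1]], [(-360, 0)])).2
      (1 + (m : Int)) ih2 ih3 (by omega)
    rw [ih1]
    exact ⟨e1, e2, e3.trans (by push_cast; ring)⟩

-- ===== VERDICT (by name: the statement is the Claim_ definition above) =====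
theorem consistentHashing_spec : Claim_equal_consistentHashing := by
  intro n _
  unfold Spec_consistentHashing consistentHashing consistentHashing_alt
  by_cases h : 1 ≤ n
  · obtain ⟨m, hm⟩ : ∃ m : Nat, n = 1 + (m : Int) := ⟨(n - 1).toNat, by omega⟩
    subst hm
    exact (pvMain m).1
  · rw [PySem.List.pyRange_one_eq_nil (by omega)]
    rfl
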